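-- pv_equiv track=rewrite | github.com/AlisonYao/DURF-Bus-Schedule-Optimization | Genetic Algorithm/temp.py | check_path_integrity
-- ===== SOURCE A (Python) =====
-- def check_path_integrity(one_path_double_digit):
--     last_visited = None
--     for i in range(len(one_path_double_digit)):
--         if i % 2 == 0:
--             two_digits = one_path_double_digit[i:i+2]
--             if two_digits != '00':
--                 # first time going to AB
--                 if last_visited is None:
--                     last_visited = 'AB'
--                 # following times
--                 elif last_visited == 'JQJY':
--                     if two_digits == '01':
--                         return False
--                     else: # '10'
--                         last_visited = 'AB'
--                 elif last_visited == 'PS':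
--                     if two_digits == '10':
--                         return False
--                     else: # '01'
--                         last_visited = 'AB'
--                 else:
--                     if two_digits == '10':
--                         last_visited = 'JQJY'
--                     else: # '01'
--                         last_visited = 'PS'
--     return True
-- ===== SOURCE B (Python) =====
-- def check_path_integrity(one_path_double_digit):
--     # filter pass: all non-'00' two-char chunks (last may be 1 char on odd length)
--     fl = [one_path_double_digit[i:i+2]
--           for i in range(0, len(one_path_double_digit), 2)
--           if one_path_double_digit[i:i+2] != '00']
--     # the first chunk is a free initializer; then check consecutive chunk pairs
--     it = iter(fl[1:])
--     for a, b in zip(it, it):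
--         if (a == '10' and b == '01') or (a != '10' and b == '10'):
--             return False
--     return True
-- ===== Notes on version B (the rewrite author's own statement) =====
-- stated objective: alternative
-- what changed: Replaces the interleaved per-index state machine (last_visited carried across the loop) with a stateless two-phase pass: first filter out the idle chunks (both digits zero), then reject on the closed condition over consecutive chunk pairs (x,y) after the free first chunk: x is '10' and y is '01', or x is not '10' and y is '10'.
import Mathlib
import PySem

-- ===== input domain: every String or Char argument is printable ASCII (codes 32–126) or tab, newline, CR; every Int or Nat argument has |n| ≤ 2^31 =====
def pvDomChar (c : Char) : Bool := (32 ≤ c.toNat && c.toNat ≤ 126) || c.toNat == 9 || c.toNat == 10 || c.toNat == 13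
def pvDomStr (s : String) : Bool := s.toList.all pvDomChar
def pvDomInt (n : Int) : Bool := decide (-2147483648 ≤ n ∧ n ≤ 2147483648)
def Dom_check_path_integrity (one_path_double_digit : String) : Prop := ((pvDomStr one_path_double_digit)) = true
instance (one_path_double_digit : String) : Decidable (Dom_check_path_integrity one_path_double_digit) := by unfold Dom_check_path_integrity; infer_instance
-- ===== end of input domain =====

-- B replaces A's interleaved single-pass state machine by a filter pass (the non-'00'
-- chunks) followed by a stateless check of consecutive chunk pairs; objective: alternative
-- decomposition, same O(n) cost.

-- ===== PORT A =====
-- A's loop 'for i in range(len(s))' with early return and state last_visited : Option String.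
-- s[i:i+2] for 0 ≤ i is exactly (toList.drop i).take 2 (Python slices clamp past the end).
def loopA (cs : List Char) : List Nat → Option String → Bool
  | [], _ => true
  | i :: rest, last =>
    if i % 2 = 0 then
      let two_digits := (cs.drop i).take 2
      if two_digits ≠ ['0', '0'] then
        match last with
        | none => loopA cs rest (some "AB")
        | some lv =>
          if lv = "JQJY" then
            if two_digits = ['0', '1'] then false else loopA cs rest (some "AB")
          else if lv = "PS" then
            if two_digits = ['1', '0'] then false else loopA cs rest (some "AB")
          else
            if two_digits = ['1', '0'] then loopA cs rest (some "JQJY")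
            else loopA cs rest (some "PS")
      else loopA cs rest last
    else loopA cs rest last

def check_path_integrity (one_path_double_digit : String) : Bool :=
  loopA one_path_double_digit.toList
    (List.range one_path_double_digit.toList.length) none

-- ===== PORT B =====
-- range(0, n, 2) over Nat indices
def strideB (n : Nat) : List Nat := (List.range ((n + 1) / 2)).map (fun k => 2 * k)

-- fl = [s[i:i+2] for i in range(0, len(s), 2) if s[i:i+2] != '00']
def flB (cs : List Char) : List (List Char) :=
  ((strideB cs.length).map (fun i => (cs.drop i).take 2)).filter
    (fun td => decide (td ≠ ['0', '0']))

-- the pair loop: zip(it, it) consumes fl[1:] two chunks at a time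
def pairsOK : List (List Char) → Bool
  | a :: b :: rest =>
    if (a = ['1', '0'] ∧ b = ['0', '1']) ∨ (a ≠ ['1', '0'] ∧ b = ['1', '0']) then false
    else pairsOK rest
  | _ => true

def check_path_integrity_alt (one_path_double_digit : String) : Bool :=
  pairsOK ((flB one_path_double_digit.toList).drop 1)

-- ===== PRECONDITION & SPEC =====
def Spec_check_path_integrity (one_path_double_digit : String) (out : Bool) : Prop := out = check_path_integrity_alt one_path_double_digit
instance (one_path_double_digit : String) (out : Bool) : Decidable (Spec_check_path_integrity one_path_double_digit out) := by unfold Spec_check_path_integrity; infer_instance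

-- ===== CLAIM (what is proved, stated in full; the proofs are below) =====
def Claim_equal_check_path_integrity : Prop := ∀ (one_path_double_digit : String), Dom_check_path_integrity one_path_double_digit → Spec_check_path_integrity one_path_double_digit (check_path_integrity one_path_double_digit)

-- ===== LEMMAS AND PROOFS =====

-- A's state machine re-read as acting on the list of kept chunks (proof helper only).
def runChunks : List (List Char) → Option String → Bool
  | [], _ => true
  | td :: rest, last =>
    match last with
    | none => runChunks rest (some "AB")
    | some lv =>
      if lv = "JQJY" then
        if td = ['0', '1'] then false else runChunks rest (some "AB")
      else if lv = "PS" then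
        if td = ['1', '0'] then false else runChunks rest (some "AB")
      else
        if td = ['1', '0'] then runChunks rest (some "JQJY")
        else runChunks rest (some "PS")

theorem loopA_eq_runChunks (cs : List Char) : ∀ (l : List Nat) (last : Option String),
    loopA cs l last =
      runChunks (((l.filter (fun i => decide (i % 2 = 0))).map
        (fun i => (cs.drop i).take 2)).filter (fun td => decide (td ≠ ['0', '0']))) last
  | [], _ => rfl
  | i :: rest, last => by
    by_cases hi : i % 2 = 0
    · by_cases htd : (cs.drop i).take 2 = ['0', '0']
      · simp [loopA, hi, htd, loopA_eq_runChunks cs rest]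
      · cases last with
        | none => simp [loopA, runChunks, hi, htd, loopA_eq_runChunks cs rest]
        | some lv =>
          by_cases h1 : lv = "JQJY"
          · simp [loopA, runChunks, hi, htd, h1, loopA_eq_runChunks cs rest]
          · by_cases h2 : lv = "PS" <;>
              simp [loopA, runChunks, hi, htd, h1, h2, loopA_eq_runChunks cs rest]
    · simp [loopA, hi, loopA_eq_runChunks cs rest]

theorem filter_range_even (n : Nat) :
    (List.range n).filter (fun i => decide (i % 2 = 0)) = strideB n := by
  induction n with
  | zero => rfl
  | succ n ih =>
    rw [List.range_succ, List.filter_append, ih]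
    rcases Nat.even_or_odd n with h | h
    · obtain ⟨m, hm⟩ := h
      have h1 : (n + 1 + 1) / 2 = (n + 1) / 2 + 1 := by omega
      simp only [strideB, h1, List.range_succ, List.map_append, List.map]
      have h2 : 2 * ((n + 1) / 2) = n := by omega
      have h3 : n % 2 = 0 := by omega
      simp [h2, h3]
    · obtain ⟨m, hm⟩ := h
      have h1 : (n + 1 + 1) / 2 = (n + 1) / 2 := by omega
      have h3 : ¬ (n % 2 = 0) := by omega
      simp [strideB, h1, h3]

theorem runChunks_AB : ∀ l, runChunks l (some "AB") = pairsOK l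
  | [] => rfl
  | [a] => by
    by_cases ha : a = ['1', '0'] <;> simp [runChunks, pairsOK, ha]
  | a :: b :: rest => by
    by_cases ha : a = ['1', '0']
    · by_cases hb : b = ['0', '1'] <;>
        simp [runChunks, pairsOK, ha, hb, runChunks_AB rest]
    · by_cases hb : b = ['1', '0'] <;>
        simp [runChunks, pairsOK, ha, hb, runChunks_AB rest]

theorem runChunks_none (l : List (List Char)) : runChunks l none = pairsOK (l.drop 1) := by
  cases l with
  | nil => rfl
  | cons a rest => simpa [runChunks] using runChunks_AB rest

-- ===== VERDICT (by name: the statement is the Claim_ definition above) =====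
theorem check_path_integrity_spec : Claim_equal_check_path_integrity := by
  intro s _
  show check_path_integrity s = check_path_integrity_alt s
  unfold check_path_integrity check_path_integrity_alt flB
  rw [loopA_eq_runChunks, filter_range_even, runChunks_none]
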